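-- pv_equiv track=rewrite | github.com/ksyyyta/project_Gogina | PZ6/6.2.py | find_last_local_max_index
-- ===== SOURCE A (Python) =====
-- def find_last_local_max_index(arr):
--     n = len(arr)
--     if n == 0:
--         return None
--     elif n == 1:
--         return 0
--
--     last_local_max_index = -1
--
--     if arr[0] > arr[1]:
--         last_local_max_index = 0
--
--     for i in range(1, n - 1):
--         if arr[i] > arr[i - 1] and arr[i] > arr[i + 1]:
--             last_local_max_index = i
--     if arr[n - 1] > arr[n - 2]:
--         last_local_max_index = n - 1
--
--     return last_local_max_index if last_local_max_index != -1 else None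
-- ===== SOURCE B (Python) =====
-- def find_last_local_max_index(arr):
--     n = len(arr)
--     if n == 0:
--         return None
--
--     def is_local_max(i):
--         if i > 0 and arr[i] <= arr[i - 1]:
--             return False
--         if i < n - 1 and arr[i] <= arr[i + 1]:
--             return False
--         return True
--
--     for i in range(n - 1, -1, -1):
--         if is_local_max(i):
--             return i
--     return None
-- ===== Notes on version B (the rewrite author's own statement) =====
-- stated objective: simpler
-- what changed: Replaces A's forward record-last pass with three special-cased endpoint branches and a -1 sentinel by a backward early-exit scan over a uniform is_local_max(i) predicate that folds the endpoints into neighbor-existence checks.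
import Mathlib
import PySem

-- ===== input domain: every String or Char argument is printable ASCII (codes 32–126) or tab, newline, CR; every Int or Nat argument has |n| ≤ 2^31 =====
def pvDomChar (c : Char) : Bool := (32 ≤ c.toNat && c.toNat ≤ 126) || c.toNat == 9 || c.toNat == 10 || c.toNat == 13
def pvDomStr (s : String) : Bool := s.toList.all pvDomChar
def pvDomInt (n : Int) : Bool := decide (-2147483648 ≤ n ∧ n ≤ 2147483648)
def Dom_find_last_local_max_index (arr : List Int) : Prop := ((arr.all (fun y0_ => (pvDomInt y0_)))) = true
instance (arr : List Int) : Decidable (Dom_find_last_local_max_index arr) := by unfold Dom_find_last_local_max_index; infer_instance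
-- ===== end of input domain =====

-- B replaces A's forward record-last pass (with three endpoint branches and a -1
-- sentinel) by a backward early-exit scan over a uniform local-max predicate:
-- simpler decomposition, same O(n) cost; equivalence of the return value is proved.

-- ===== PORT A =====
def find_last_local_max_index (arr : List Int) : Option Int :=
  let n : Int := arr.length
  if n = 0 then none
  else if n = 1 then some 0
  else
    let last0 : Int := -1
    let last1 : Int :=
      if PySem.List.pyGetD arr 0 0 > PySem.List.pyGetD arr 1 0 then 0 else last0
    let last2 : Int :=
      (PySem.List.pyRange 1 (n - 1) 1).foldl
        (fun acc i =>
          if PySem.List.pyGetD arr i 0 > PySem.List.pyGetD arr (i - 1) 0 ∧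
             PySem.List.pyGetD arr i 0 > PySem.List.pyGetD arr (i + 1) 0 then i else acc)
        last1
    let last3 : Int :=
      if PySem.List.pyGetD arr (n - 1) 0 > PySem.List.pyGetD arr (n - 2) 0 then n - 1
      else last2
    if last3 ≠ -1 then some last3 else none

-- ===== PORT B =====
-- helper is_local_max from Source B: early-False neighbor-existence checks
def pvIsLocalMax (arr : List Int) (n i : Int) : Bool :=
  if i > 0 ∧ PySem.List.pyGetD arr i 0 ≤ PySem.List.pyGetD arr (i - 1) 0 then false
  else if i < n - 1 ∧ PySem.List.pyGetD arr i 0 ≤ PySem.List.pyGetD arr (i + 1) 0 then false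
  else true

-- Source B's backward for-loop returning the first local max (find? = loop with return)
def find_last_local_max_index_alt (arr : List Int) : Option Int :=
  let n : Int := arr.length
  if n = 0 then none
  else (PySem.List.pyRange (n - 1) (-1) (-1)).find? (pvIsLocalMax arr n)

-- ===== PRECONDITION & SPEC =====
def Spec_find_last_local_max_index (arr : List Int) (out : Option Int) : Prop := out = find_last_local_max_index_alt arr
instance (arr : List Int) (out : Option Int) : Decidable (Spec_find_last_local_max_index arr out) := by unfold Spec_find_last_local_max_index; infer_instance

-- ===== CLAIM (what is proved, stated in full; the proofs are below) =====
def Claim_equal_find_last_local_max_index : Prop := ∀ (arr : List Int), Dom_find_last_local_max_index arr → Spec_find_last_local_max_index arr (find_last_local_max_index arr)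

-- ===== LEMMAS AND PROOFS =====

-- A's record-last foldl picks the LAST element satisfying P, i.e. the first of the reverse.
theorem pvFoldlPick (P : Int → Prop) [DecidablePred P] :
    ∀ (l : List Int) (init : Int),
      l.foldl (fun acc i => if P i then i else acc) init
        = ((l.reverse.find? (fun i => decide (P i))).getD init) := by
  intro l
  induction l with
  | nil => intro init; simp
  | cons x l ih =>
      intro init
      simp only [List.foldl_cons, ih, List.reverse_cons, List.find?_append]
      cases h : l.reverse.find? (fun i => decide (P i)) with
      | some y => simp
      | none => simp only [Option.none_or]; by_cases hp : P x <;> simp [hp, List.find?]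

theorem pvFindCongr (p q : Int → Bool) :
    ∀ (l : List Int), (∀ x ∈ l, p x = q x) → l.find? p = l.find? q := by
  intro l
  induction l with
  | nil => intro _; rfl
  | cons x l ih =>
      intro h
      have hx := h x (by simp)
      simp only [List.find?]
      rw [hx, ih (fun y hy => h y (by simp [hy]))]

-- ===== VERDICT (by name: the statement is the Claim_ definition above) =====
theorem find_last_local_max_index_spec : Claim_equal_find_last_local_max_index := by
  intro arr _
  unfold Spec_find_last_local_max_index find_last_local_max_index find_last_local_max_index_alt
  by_cases h0 : (arr.length : Int) = 0
  · simp [h0]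
  by_cases h1 : (arr.length : Int) = 1
  · simp only [h1, if_false, if_true, one_ne_zero]
    rw [show (1:Int) - 1 = 0 from rfl,
        show PySem.List.pyRange 0 (-1) (-1) = [0] from by decide]
    have : pvIsLocalMax arr 1 0 = true := by
      simp [pvIsLocalMax]
    simp [List.find?, this]
  · -- n ≥ 2
    set n : Int := (arr.length : Int) with hn
    have hge : 2 ≤ n := by
      have : 0 ≤ n := by positivity
      omega
    simp only [h0, h1, if_false]
    -- decompose the descending range
    have hrev : PySem.List.pyRange (n - 1) (-1) (-1)
        = (PySem.List.pyRange 0 n 1).reverse := by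
      have := PySem.List.pyRange_neg_one_eq_reverse (n - 1) (-1)
      simpa using this
    have htail : PySem.List.pyRange 1 n 1
        = PySem.List.pyRange 1 (n - 1) 1 ++ [n - 1] := by
      have h := PySem.List.pyRange_one_succ_right (a := 1) (b := n - 1) (by omega)
      rw [show n - 1 + 1 = n from by omega] at h
      exact h
    have hsplit : PySem.List.pyRange 0 n 1
        = [0] ++ (PySem.List.pyRange 1 (n - 1) 1 ++ [n - 1]) := by
      rw [PySem.List.pyRange_one_append 0 1 n (by omega) (by omega), htail]
      rfl
    set pA : Int → Bool := fun i =>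
      decide (PySem.List.pyGetD arr i 0 > PySem.List.pyGetD arr (i - 1) 0 ∧
              PySem.List.pyGetD arr i 0 > PySem.List.pyGetD arr (i + 1) 0) with hpA
    -- the predicates agree on the interior
    have hAgree : ∀ x ∈ (PySem.List.pyRange 1 (n - 1) 1).reverse,
        pvIsLocalMax arr n x = pA x := by
      intro x hx
      rw [List.mem_reverse, PySem.List.mem_pyRange_one] at hx
      obtain ⟨hx1, hx2⟩ := hx
      simp only [pvIsLocalMax, hpA]
      have hx0 : x > 0 := by omega
      by_cases hL : PySem.List.pyGetD arr x 0 ≤ PySem.List.pyGetD arr (x - 1) 0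
      · simp [hx0, hL]
      · by_cases hR : PySem.List.pyGetD arr x 0 ≤ PySem.List.pyGetD arr (x + 1) 0
        · simp [hx0, hx2, hL, hR]
        · simp [hx0, hx2, hL, hR]; omega
    -- endpoint predicate values
    have hLlast : pvIsLocalMax arr n (n - 1)
        = decide (PySem.List.pyGetD arr (n - 1) 0 > PySem.List.pyGetD arr (n - 2) 0) := by
      simp only [pvIsLocalMax, show n - 1 - 1 = n - 2 from by omega]
      by_cases hQ : PySem.List.pyGetD arr (n - 1) 0 ≤ PySem.List.pyGetD arr (n - 2) 0
      · rw [if_pos ⟨by omega, hQ⟩]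
        simp [show ¬ (PySem.List.pyGetD arr (n - 2) 0 < PySem.List.pyGetD arr (n - 1) 0)
          from by omega]
      · rw [if_neg (fun h => hQ h.2), if_neg (fun h => absurd h.1 (by omega))]
        simp [show PySem.List.pyGetD arr (n - 2) 0 < PySem.List.pyGetD arr (n - 1) 0
          from by omega]
    have hLzero : pvIsLocalMax arr n 0
        = decide (PySem.List.pyGetD arr 0 0 > PySem.List.pyGetD arr 1 0) := by
      simp only [pvIsLocalMax, zero_add]
      rw [if_neg (fun h => absurd h.1 (by omega))]
      by_cases hQ : PySem.List.pyGetD arr 0 0 ≤ PySem.List.pyGetD arr 1 0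
      · rw [if_pos ⟨by omega, hQ⟩]
        simp [show ¬ (PySem.List.pyGetD arr 1 0 < PySem.List.pyGetD arr 0 0) from by omega]
      · rw [if_neg (fun h => hQ h.2)]
        simp [show PySem.List.pyGetD arr 1 0 < PySem.List.pyGetD arr 0 0 from by omega]
    rw [hrev, hsplit]
    simp only [List.reverse_append, List.reverse_cons, List.reverse_nil, List.nil_append,
      List.cons_append]
    -- rewrite A's foldl as a reverse find?
    rw [pvFoldlPick (fun i =>
          PySem.List.pyGetD arr i 0 > PySem.List.pyGetD arr (i - 1) 0 ∧
          PySem.List.pyGetD arr i 0 > PySem.List.pyGetD arr (i + 1) 0)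
        (PySem.List.pyRange 1 (n - 1) 1), ← hpA]
    by_cases hQn : PySem.List.pyGetD arr (n - 1) 0 > PySem.List.pyGetD arr (n - 2) 0
    · rw [List.find?_cons_of_pos (by rw [hLlast]; simpa using hQn)]
      rw [if_pos hQn, if_pos (show n - 1 ≠ -1 from by omega)]
    · rw [List.find?_cons_of_neg (by rw [hLlast]; simpa using hQn)]
      rw [if_neg hQn, List.find?_append]
      rw [pvFindCongr (pvIsLocalMax arr n) pA _ hAgree]
      cases hF : (PySem.List.pyRange 1 (n - 1) 1).reverse.find? pA with
      | some i =>
          have hm : i ∈ (PySem.List.pyRange 1 (n - 1) 1).reverse :=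
            List.mem_of_find?_eq_some hF
          rw [List.mem_reverse, PySem.List.mem_pyRange_one] at hm
          simp only [Option.getD_some, Option.some_or]
          rw [if_pos (show i ≠ -1 from by omega)]
      | none =>
          simp only [Option.getD_none, Option.none_or]
          by_cases hQ0 : PySem.List.pyGetD arr 0 0 > PySem.List.pyGetD arr 1 0
          · rw [List.find?_cons_of_pos (by rw [hLzero]; simpa using hQ0)]
            rw [if_pos hQ0, if_pos (show (0:Int) ≠ -1 from by decide)]
          · rw [List.find?_cons_of_neg (by rw [hLzero]; simpa using hQ0)]
            rw [if_neg hQ0]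
            simp
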